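-- pv_equiv track=rewrite | github.com/kitanoyoru/Labs | AOIS/Lab4/lab4/operations/minimized.py | start_glued
-- ===== SOURCE A (Python) =====
-- def start_glued(table):
--     short_logic_table = []
--     index = []
--
--     for i in range(len(table)):
--         is_not_gluing = False
--         for j in range(i+1, len(table)):
--             false_index = gluing_of_vectors(table[i], table[j])
--             if false_index >= 0:
--                 is_not_gluing = True
--                 index.append(j)
--                 new_vector = table[i].copy()
--                 new_vector[false_index] = None
--                 short_logic_table.append(new_vector)
--         if not is_not_gluing and i not in index:
--             short_logic_table.append(table[i])
--
--     if short_logic_table is not None: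
--         return short_logic_table
--
--     return table
--
-- def gluing_of_vectors(first_vector, second_vector):
--     result_vector = []
--
--     for i in range(len(first_vector)):
--          result_vector.append(first_vector[i] == second_vector[i])
--     if result_vector.count(False) == 1:
--         return result_vector.index(False)
--
--     return -1
-- ===== SOURCE B (Python) =====
-- def start_glued(table):
--     # Bucket each row under every single-position-masked key, so rows differing in
--     # exactly one position are found by dict lookup instead of an all-pairs scan.
--     buckets = {}
--     for j, row in enumerate(table):
--         for p in range(len(row)):
--             buckets.setdefault((p, tuple(row[:p] + row[p + 1:])), []).append((j, row[p]))
--     glued = set()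
--     out = []
--     for i, row in enumerate(table):
--         pairs = []
--         for p in range(len(row)):
--             for j, v in buckets[(p, tuple(row[:p] + row[p + 1:]))]:
--                 if j > i and v != row[p]:
--                     pairs.append((j, p))
--         pairs.sort(key=lambda t: t[0])
--         for j, p in pairs:
--             glued.add(j)
--             merged = row.copy()
--             merged[p] = None
--             out.append(merged)
--         if not pairs and i not in glued:
--             out.append(row)
--     return out
-- ===== Notes on version B (the rewrite author's own statement) =====
-- stated objective: alternative
-- what changed: replaces A's all-pairs row comparison (O(n^2*m)) by a dict bucketing every row under each single-position-masked key, so gluing partners are found by hash lookup (O(n*m^2), a different cost profile, not measured faster); Pre_ restricts to tables whose rows all share one common length (the natural domain of minterm vectors) — on mixed-length tables A raises IndexError when a later row is shorter, and when a later row is longer A compares it only on a truncated prefix, a corner no specification fixes, where B simply never glues rows of different widths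
-- outside the precondition, e.g. on start_glued([[0], [1, 1]]): A returns [[None]], B returns [[0], [1, 1]]
import Mathlib
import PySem

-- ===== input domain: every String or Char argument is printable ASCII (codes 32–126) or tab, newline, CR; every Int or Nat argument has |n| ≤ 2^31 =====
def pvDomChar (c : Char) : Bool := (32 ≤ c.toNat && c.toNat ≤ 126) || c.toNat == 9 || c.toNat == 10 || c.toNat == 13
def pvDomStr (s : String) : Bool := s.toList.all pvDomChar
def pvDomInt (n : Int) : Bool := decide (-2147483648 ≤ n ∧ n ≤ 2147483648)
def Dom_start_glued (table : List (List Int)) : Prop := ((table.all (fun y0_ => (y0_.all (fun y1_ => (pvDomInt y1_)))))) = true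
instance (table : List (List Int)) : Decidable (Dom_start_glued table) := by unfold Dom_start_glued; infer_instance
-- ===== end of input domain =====

-- B buckets every row under each single-position-masked key, finding gluing partners by
-- dict lookup instead of A's all-pairs scan (objective: alternative).

-- ===== PORT A =====
def gluing_of_vectors (first_vector second_vector : List Int) : Int :=
  let result_vector : List Bool :=
    (PySem.List.pyRange 0 (PySem.List.len first_vector) 1).foldl
      (fun acc i => acc ++ [PySem.List.pyGet? first_vector i == PySem.List.pyGet? second_vector i]) []
  if result_vector.count false = 1 then
    -- result_vector.index(False): count = 1 guarantees a False is present, so index? is some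
    match PySem.List.index? result_vector false with
    | some k => (k : Int)
    | none => -1
  else -1

def start_glued (table : List (List Int)) : List (List (Option Int)) :=
  let n : Int := PySem.List.len table
  let st :=
    (PySem.List.pyRange 0 n 1).foldl
      (fun (st : List (List (Option Int)) × List Int) i =>
        let ti := PySem.List.pyGetD table i []
        let inner :=
          (PySem.List.pyRange (i+1) n 1).foldl
            (fun (st2 : List (List (Option Int)) × List Int × Bool) j =>
              let false_index := gluing_of_vectors ti (PySem.List.pyGetD table j [])
              if 0 ≤ false_index then
                -- new_vector = table[i].copy(); new_vector[false_index] = None  (false_index in range)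
                (st2.1 ++ [PySem.List.pySetD (List.map some ti) false_index none],
                 st2.2.1 ++ [j], true)
              else st2)
            (st.1, st.2, false)
        if inner.2.2 = false ∧ i ∉ inner.2.1 then
          (inner.1 ++ [List.map some ti], inner.2.1)
        else (inner.1, inner.2.1))
      ([], [])
  st.1

-- ===== PORT B =====
-- key = (p, tuple(row[:p] + row[p+1:]))
def pvMaskKey (row : List Int) (p : Int) : Int × List Int :=
  (p, PySem.List.slice row none (some p) ++ PySem.List.slice row (some (p+1)) none)

def start_glued_alt (table : List (List Int)) : List (List (Option Int)) :=
  let buckets :=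
    (PySem.List.enumerate table).foldl
      (fun d jr =>
        (PySem.List.pyRange 0 (PySem.List.len jr.2) 1).foldl
          (fun d p =>
            -- buckets.setdefault(key, []).append((j, row[p]))
            d.modify (pvMaskKey jr.2 p) [] (· ++ [(jr.1, PySem.List.pyGetD jr.2 p 0)]))
          d)
      (PySem.Dict.empty : PySem.Dict (Int × List Int) (List (Int × Int)))
  let st :=
    (PySem.List.enumerate table).foldl
      (fun (st : PySem.Set Int × List (List (Option Int))) ir =>
        let i := ir.1
        let row := ir.2
        let pairs :=
          (PySem.List.pyRange 0 (PySem.List.len row) 1).foldl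
            (fun acc p =>
              -- buckets[key]: the key is always present (row itself was inserted under it)
              (buckets.getD (pvMaskKey row p) []).foldl
                (fun acc jv =>
                  if i < jv.1 ∧ jv.2 ≠ PySem.List.pyGetD row p 0 then acc ++ [(jv.1, p)] else acc)
                acc)
            []
        let spairs := PySem.List.sorted pairs (fun t => t.1)
        let st2 := spairs.foldl
          (fun (st2 : PySem.Set Int × List (List (Option Int))) jp =>
            (PySem.Set.add st2.1 jp.1, st2.2 ++ [PySem.List.pySetD (List.map some row) jp.2 none]))
          st
        if spairs = [] ∧ i ∉ st2.1 then (st2.1, st2.2 ++ [List.map some row]) else st2)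
      ((PySem.Set.empty : PySem.Set Int), [])
  st.2

-- ===== PRECONDITION & SPEC =====
-- Pre_ restricts to tables whose rows all share one common length, the natural domain of
-- minterm vectors: on mixed-length tables A raises IndexError when a later row is shorter,
-- and when a later row is longer A compares it only on a truncated prefix — a corner no
-- specification fixes, where B simply never glues rows of different widths.
def Pre_start_glued (table : List (List Int)) : Prop :=
  ∀ r ∈ table, r.length = (table.headD []).length
instance (table : List (List Int)) : Decidable (Pre_start_glued table) := by unfold Pre_start_glued; infer_instance

def pvWitness_start_glued : List (List Int) := [[0, 1], [1, 1]]

def Spec_start_glued (table : List (List Int)) (out : List (List (Option Int))) : Prop := out = start_glued_alt table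
instance (table : List (List Int)) (out : List (List (Option Int))) : Decidable (Spec_start_glued table out) := by unfold Spec_start_glued; infer_instance

-- ===== CLAIM (what is proved, stated in full; the proofs are below) =====
def Claim_equal_start_glued : Prop := ∀ (table : List (List Int)), Dom_start_glued table → Pre_start_glued table → Spec_start_glued table (start_glued table)

-- ===== LEMMAS AND PROOFS =====

-- ---- proof-side abbreviations ----
def rowD (table : List (List Int)) (i : Int) : List Int := PySem.List.pyGetD table i []

def glueIdx (table : List (List Int)) (i j : Int) : Int :=
  gluing_of_vectors (rowD table i) (rowD table j)

def JsL (table : List (List Int)) (i : Int) : List Int :=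
  (PySem.List.pyRange (i+1) (PySem.List.len table) 1).filter (fun j => decide (0 ≤ glueIdx table i j))

def emitV (table : List (List Int)) (i j : Int) : List (Option Int) :=
  PySem.List.pySetD (List.map some (rowD table i)) (glueIdx table i j) none

def jsmap (table : List (List Int)) (i : Int) : List (Int × Int) :=
  (JsL table i).map (fun j => (j, glueIdx table i j))

def bucketsB (table : List (List Int)) : PySem.Dict (Int × List Int) (List (Int × Int)) :=
  (PySem.List.enumerate table).foldl
    (fun d jr =>
      (PySem.List.pyRange 0 (PySem.List.len jr.2) 1).foldl
        (fun d p =>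
          d.modify (pvMaskKey jr.2 p) [] (· ++ [(jr.1, PySem.List.pyGetD jr.2 p 0)]))
        d)
    PySem.Dict.empty

def candsB (table : List (List Int)) (i : Int) : List (Int × Int) :=
  (PySem.List.pyRange 0 (PySem.List.len (rowD table i)) 1).foldl
    (fun acc p =>
      ((bucketsB table).getD (pvMaskKey (rowD table i) p) []).foldl
        (fun acc jv =>
          if i < jv.1 ∧ jv.2 ≠ PySem.List.pyGetD (rowD table i) p 0 then acc ++ [(jv.1, p)] else acc)
        acc)
    []

def diffPos (u v : List Int) : List Nat :=
  (List.range u.length).filter (fun k => decide (u.getD k 0 ≠ v.getD k 0))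

def bigList (table : List (List Int)) : List ((Int × List Int) × (Int × Int)) :=
  (PySem.List.enumerate table).flatMap
    (fun jr =>
      (PySem.List.pyRange 0 (PySem.List.len jr.2) 1).map
        (fun p => (pvMaskKey jr.2 p, (jr.1, PySem.List.pyGetD jr.2 p 0))))

-- ---- generic list lemmas ----
theorem pv_filter_flatMap {α β : Type} (l : List α) (g : α → List β) (q : β → Bool) :
    (l.flatMap g).filter q = l.flatMap (fun x => (g x).filter q) := by
  induction l with
  | nil => rfl
  | cons a t ih => simp [List.flatMap_cons, List.filter_append, ih]

theorem pv_foldl_flatMap {α β σ : Type} (l : List α) (g : α → List β) (f : σ → β → σ) (init : σ) :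
    (l.flatMap g).foldl f init = l.foldl (fun s x => (g x).foldl f s) init := by
  induction l generalizing init with
  | nil => rfl
  | cons a t ih => simp [List.flatMap_cons, List.foldl_append, ih]

theorem pv_nodup_flatMap {α β : Type} (l : List α) (g : α → List β)
    (hg : ∀ a ∈ l, (g a).Nodup)
    (hdisj : l.Pairwise (fun a b => ∀ x ∈ g a, x ∉ g b)) : (l.flatMap g).Nodup := by
  induction l with
  | nil => simp
  | cons a t ih =>
    rw [List.flatMap_cons, List.nodup_append]
    obtain ⟨hd, hp⟩ := List.pairwise_cons.mp hdisj
    refine ⟨hg a List.mem_cons_self, ih (fun b hb => hg b (List.mem_cons_of_mem _ hb)) hp, ?_⟩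
    intro x hx y hy
    obtain ⟨b, hb, hyb⟩ := List.mem_flatMap.mp hy
    rintro rfl
    exact hd b hb x hx hyb

theorem pv_pairwise_flatMap {α β : Type} (l : List α) (g : α → List β) (R : β → β → Prop)
    (hg : ∀ a ∈ l, (g a).Pairwise R)
    (hdisj : l.Pairwise (fun a b => ∀ x ∈ g a, ∀ y ∈ g b, R x y)) : (l.flatMap g).Pairwise R := by
  induction l with
  | nil => simp
  | cons a t ih =>
    rw [List.flatMap_cons, List.pairwise_append]
    obtain ⟨hd, hp⟩ := List.pairwise_cons.mp hdisj
    refine ⟨hg a List.mem_cons_self, ih (fun b hb => hg b (List.mem_cons_of_mem _ hb)) hp, ?_⟩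
    intro x hx y hy
    obtain ⟨b, hb, hyb⟩ := List.mem_flatMap.mp hy
    exact hd b hb x hx y hyb

theorem pv_filter_range_singleton {n p : Nat} {q : Nat → Bool} :
    (List.range n).filter q = [p] ↔ p < n ∧ q p ∧ ∀ k, k < n → k ≠ p → ¬ q k := by
  constructor
  · intro h
    have hp : p ∈ (List.range n).filter q := by rw [h]; exact List.mem_cons_self
    rw [List.mem_filter, List.mem_range] at hp
    refine ⟨hp.1, hp.2, ?_⟩
    intro k hk hkp hq
    have hmem : k ∈ (List.range n).filter q := by
      rw [List.mem_filter, List.mem_range]; exact ⟨hk, hq⟩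
    rw [h, List.mem_singleton] at hmem
    exact hkp hmem
  · rintro ⟨h1, h2, h3⟩
    have heq : (List.range n).filter q = (List.range n).filter (· == p) := by
      apply List.filter_congr
      intro k hk
      rw [List.mem_range] at hk
      rcases eq_or_ne k p with rfl | hne
      · simp [h2]
      · have hqk : q k = false := Bool.eq_false_iff.mpr (h3 k hk hne)
        simp [hqk, hne]
    have hle : (List.range n).count p ≤ 1 :=
      List.nodup_iff_count_le_one.mp List.nodup_range p
    have hpos : 0 < (List.range n).count p := List.count_pos_iff.mpr (List.mem_range.mpr h1)
    have hc : (List.range n).count p = 1 := by omega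
    rw [heq, List.filter_beq, hc, List.replicate_one]

-- ---- A-side loop shape ----
theorem pv_inner_fold {α β : Type} (p : α → Prop) [DecidablePred p] (f : α → β) (l : List α)
    (s : List β) (ix : List α) (fl : Bool) :
    l.foldl (fun st x => if p x then (st.1 ++ [f x], st.2.1 ++ [x], true) else st) (s, ix, fl)
      = (s ++ (l.filter (fun x => decide (p x))).map f,
         ix ++ l.filter (fun x => decide (p x)),
         fl || l.any (fun x => decide (p x))) := by
  induction l generalizing s ix fl with
  | nil => simp
  | cons a t ih => by_cases h : p a <;> simp [h, ih]

-- ---- gluing characterization ----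
theorem pv_rv_eq (u v : List Int) :
    (PySem.List.pyRange 0 (PySem.List.len u) 1).foldl
        (fun acc i => acc ++ [PySem.List.pyGet? u i == PySem.List.pyGet? v i]) []
      = (List.range u.length).map (fun k => u[k]? == v[k]?) := by
  rw [PySem.List.foldl_append_singleton_eq_map, List.nil_append, PySem.List.len_eq,
    PySem.List.pyRange_zero_natCast, List.map_map]
  simp [Function.comp_def]

theorem pv_count_eq (u v : List Int) (hlen : u.length ≤ v.length) :
    ((List.range u.length).map (fun k => u[k]? == v[k]?)).count false = (diffPos u v).length := by
  unfold diffPos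
  rw [List.count_eq_countP, List.countP_map, ← List.countP_eq_length_filter]
  apply List.countP_congr
  intro k hk
  rw [List.mem_range] at hk
  have hk2 : k < v.length := lt_of_lt_of_le hk hlen
  simp only [Function.comp_def, List.getElem?_eq_getElem hk, List.getElem?_eq_getElem hk2,
    List.getD_eq_getElem _ _ hk, List.getD_eq_getElem _ _ hk2]
  by_cases h : u[k] = v[k] <;> simp [h]

theorem pv_idx_eq (u v : List Int) (p : Nat) (hlen : u.length ≤ v.length)
    (h : diffPos u v = [p]) :
    PySem.List.index? ((List.range u.length).map fun k => u[k]? == v[k]?) false = some p := by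
  obtain ⟨h1, h2, h3⟩ := pv_filter_range_singleton.mp h
  unfold PySem.List.index?
  rw [List.idxOf?_eq_some_iff]
  refine ⟨by simpa using h1, ?_, ?_⟩
  · have hp2 : p < v.length := lt_of_lt_of_le h1 hlen
    simp only [List.getElem_map, List.getElem_range, List.getElem?_eq_getElem h1,
      List.getElem?_eq_getElem hp2]
    rw [decide_eq_true_iff] at h2
    rw [List.getD_eq_getElem _ _ h1, List.getD_eq_getElem _ _ hp2] at h2
    simp [h2]
  · intro j hj
    have hjn : j < u.length := lt_trans hj h1
    have hj2 : j < v.length := lt_of_lt_of_le hjn hlen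
    have hq := h3 j hjn (Nat.ne_of_lt hj)
    rw [decide_eq_true_iff, List.getD_eq_getElem _ _ hjn, List.getD_eq_getElem _ _ hj2] at hq
    push Not at hq
    simp [List.getElem_map, List.getElem_range, List.getElem?_eq_getElem hjn,
      List.getElem?_eq_getElem hj2, hq]

theorem pv_glue_char (u v : List Int) (hlen : u.length ≤ v.length) :
    gluing_of_vectors u v = (match diffPos u v with | [p] => (p : Int) | _ => -1) := by
  unfold gluing_of_vectors
  simp only [pv_rv_eq, pv_count_eq u v hlen]
  rcases hd : diffPos u v with _ | ⟨p, _ | ⟨p2, t⟩⟩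
  · simp
  · rw [pv_idx_eq u v p hlen hd]
    simp
  · simp

-- ---- mask characterization ----
theorem pv_masklist_iff (u v : List Int) (p : Nat) (hp : p < u.length) (hlen : u.length = v.length) :
    (v.take p ++ List.drop (p+1) v = u.take p ++ List.drop (p+1) u)
      ↔ ∀ k, k < u.length → k ≠ p → v.getD k 0 = u.getD k 0 := by
  have hv' : v.take p ++ List.drop (p+1) v = v.eraseIdx p := by
    rw [List.eraseIdx_eq_take_drop_succ]
  have hu' : u.take p ++ List.drop (p+1) u = u.eraseIdx p := by
    rw [List.eraseIdx_eq_take_drop_succ]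
  rw [hv', hu']
  constructor
  · intro h k hk hkp
    have hkv : k < v.length := by omega
    rw [List.getD_eq_getElem _ _ hkv, List.getD_eq_getElem _ _ hk]
    rcases Nat.lt_or_ge k p with hlt | hge
    · have h2 := congrArg (fun l => l[k]?) h
      simp only [List.getElem?_eraseIdx, if_pos hlt] at h2
      rw [List.getElem?_eq_getElem hkv, List.getElem?_eq_getElem hk] at h2
      exact Option.some.inj h2
    · have hk1 : p < k := lt_of_le_of_ne hge (Ne.symm hkp)
      have h2 := congrArg (fun l => l[k-1]?) h
      simp only [List.getElem?_eraseIdx, if_neg (by omega : ¬ (k-1 < p))] at h2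
      have hkk : k - 1 + 1 = k := by omega
      rw [hkk, List.getElem?_eq_getElem hkv, List.getElem?_eq_getElem hk] at h2
      exact Option.some.inj h2
  · intro h
    apply List.ext_getElem?
    intro m
    rw [List.getElem?_eraseIdx, List.getElem?_eraseIdx]
    split_ifs with hm
    · by_cases hmu : m < u.length
      · have := h m hmu (by omega)
        rw [List.getD_eq_getElem _ _ (by omega : m < v.length), List.getD_eq_getElem _ _ hmu] at this
        rw [List.getElem?_eq_getElem (by omega : m < v.length), List.getElem?_eq_getElem hmu, this]
      · rw [List.getElem?_eq_none (by omega : v.length ≤ m), List.getElem?_eq_none (by omega : u.length ≤ m)]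
    · by_cases hm2 : m + 1 < u.length
      · have := h (m+1) hm2 (by omega)
        rw [List.getD_eq_getElem _ _ (by omega : m+1 < v.length), List.getD_eq_getElem _ _ hm2] at this
        rw [List.getElem?_eq_getElem (by omega : m+1 < v.length), List.getElem?_eq_getElem hm2, this]
      · rw [List.getElem?_eq_none (by omega : v.length ≤ m + 1),
          List.getElem?_eq_none (by omega : u.length ≤ m + 1)]

theorem pv_mask_iff (u v : List Int) (p : Nat) (hp : p < u.length) (hlen : u.length = v.length) :
    (pvMaskKey v (p : Int) = pvMaskKey u (p : Int) ∧ v.getD p 0 ≠ u.getD p 0)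
      ↔ diffPos u v = [p] := by
  have hc : ((p : Int) + 1) = (((p+1 : Nat)) : Int) := by push_cast; ring
  unfold pvMaskKey
  rw [hc, PySem.List.slice_to_natCast, PySem.List.slice_to_natCast,
    PySem.List.slice_from_natCast, PySem.List.slice_from_natCast]
  have htr : (((p : Int), v.take p ++ List.drop (p+1) v)
        = ((p : Int), u.take p ++ List.drop (p+1) u))
      ↔ (v.take p ++ List.drop (p+1) v = u.take p ++ List.drop (p+1) u) := by
    constructor
    · intro h
      have := congrArg (fun t => t.2) h
      simpa using this
    · intro h; rw [h]
  rw [htr, pv_masklist_iff u v p hp hlen]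
  unfold diffPos
  rw [pv_filter_range_singleton]
  constructor
  · rintro ⟨hmask, hne⟩
    refine ⟨hp, ?_, ?_⟩
    · rw [decide_eq_true_iff]
      exact fun h => hne h.symm
    · intro k hk hkp hq
      rw [decide_eq_true_iff] at hq
      exact hq (hmask k hk hkp).symm
  · rintro ⟨h1, h2, h3⟩
    refine ⟨?_, ?_⟩
    · intro k hk hkp
      have h4 := h3 k hk hkp
      rw [decide_eq_true_iff] at h4
      push Not at h4
      exact h4.symm
    · rw [decide_eq_true_iff] at h2
      exact fun h => h2 h.symm

-- ---- bucket characterization ----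
theorem pv_bucketsB_eq (table : List (List Int)) :
    bucketsB table
      = (bigList table).foldl (fun d pr => d.modify pr.1 [] (· ++ [pr.2])) PySem.Dict.empty := by
  unfold bigList bucketsB
  rw [pv_foldl_flatMap]
  apply PySem.List.foldl_congr_mem
  intro d jr _
  rw [List.foldl_map]

theorem pv_bucket_getD (table : List (List Int)) (K : Int × List Int) :
    (bucketsB table).getD K []
      = ((bigList table).filter (fun pr => pr.1 == K)).map (·.2) := by
  rw [pv_bucketsB_eq, PySem.Dict.getD_foldl_modify_append, PySem.Dict.getD_empty, List.nil_append]

theorem pv_bigList_mem (table : List (List Int)) (pr : (Int × List Int) × (Int × Int)) :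
    pr ∈ bigList table
      ↔ ∃ j : Int, 0 ≤ j ∧ j < (table.length : Int) ∧
          ∃ p : Int, p ∈ PySem.List.pyRange 0 (PySem.List.len (rowD table j)) 1 ∧
            pr = (pvMaskKey (rowD table j) p, (j, PySem.List.pyGetD (rowD table j) p 0)) := by
  unfold bigList
  rw [PySem.List.enumerate_eq_map_pyRange table []]
  constructor
  · intro h
    obtain ⟨jr, hjr, hin⟩ := List.mem_flatMap.mp h
    obtain ⟨j, hj, rfl⟩ := List.mem_map.mp hjr
    obtain ⟨p, hp, rfl⟩ := List.mem_map.mp hin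
    have hj' := PySem.List.mem_pyRange_one.mp hj
    exact ⟨j, hj'.1, by simpa [PySem.List.len_eq] using hj'.2, p, hp, rfl⟩
  · rintro ⟨j, hj0, hjn, p, hp, rfl⟩
    apply List.mem_flatMap.mpr
    refine ⟨(j, rowD table j), ?_, ?_⟩
    · exact List.mem_map.mpr ⟨j,
        PySem.List.mem_pyRange_one.mpr ⟨hj0, by simpa [PySem.List.len_eq] using hjn⟩, rfl⟩
    · exact List.mem_map.mpr ⟨p, hp, rfl⟩

theorem pv_bucket_mem (table : List (List Int)) (K : Int × List Int) (jv : Int × Int) :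
    jv ∈ (bucketsB table).getD K []
      ↔ ∃ j : Int, 0 ≤ j ∧ j < (table.length : Int) ∧
          ∃ p : Int, p ∈ PySem.List.pyRange 0 (PySem.List.len (rowD table j)) 1 ∧
            pvMaskKey (rowD table j) p = K ∧
            jv = (j, PySem.List.pyGetD (rowD table j) p 0) := by
  rw [pv_bucket_getD]
  constructor
  · intro h
    obtain ⟨pr, hpr, rfl⟩ := List.mem_map.mp h
    obtain ⟨hpr1, hpr2⟩ := List.mem_filter.mp hpr
    obtain ⟨j, hj0, hjn, p, hp, rfl⟩ := (pv_bigList_mem table pr).mp hpr1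
    exact ⟨j, hj0, hjn, p, hp, eq_of_beq hpr2, rfl⟩
  · rintro ⟨j, hj0, hjn, p, hp, hK, rfl⟩
    apply List.mem_map.mpr
    refine ⟨(pvMaskKey (rowD table j) p, (j, PySem.List.pyGetD (rowD table j) p 0)), ?_, rfl⟩
    apply List.mem_filter.mpr
    exact ⟨(pv_bigList_mem table _).mpr ⟨j, hj0, hjn, p, hp, rfl⟩, beq_iff_eq.mpr hK⟩

-- ---- Pre_: all rows share one length ----
theorem pv_pre_len (table : List (List Int)) (hpre : Pre_start_glued table) (i j : Int)
    (hi0 : 0 ≤ i) (hin : i < (table.length : Int)) (hj0 : 0 ≤ j) (hjn : j < (table.length : Int)) :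
    (rowD table j).length = (rowD table i).length := by
  have hri : rowD table i ∈ table := PySem.List.pyGetD_mem table [] ⟨by omega, hin⟩
  have hrj : rowD table j ∈ table := PySem.List.pyGetD_mem table [] ⟨by omega, hjn⟩
  rw [hpre _ hri, hpre _ hrj]

-- ---- cands characterization ----
theorem pv_candsB_eq (table : List (List Int)) (i : Int) :
    candsB table i
      = (PySem.List.pyRange 0 (PySem.List.len (rowD table i)) 1).flatMap
          (fun p =>
            (((bucketsB table).getD (pvMaskKey (rowD table i) p) []).filter
                (fun jv => decide (i < jv.1 ∧ jv.2 ≠ PySem.List.pyGetD (rowD table i) p 0))).map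
              (fun jv => (jv.1, p))) := by
  unfold candsB
  simp only [PySem.List.foldl_append_ite, PySem.List.foldl_append_eq_flatMap]
  simp

theorem pv_candsB_mem (table : List (List Int)) (hpre : Pre_start_glued table) (i : Int)
    (h0 : 0 ≤ i) (hn : i < PySem.List.len table) (j q : Int) :
    ((j, q) ∈ candsB table i) ↔ ((j, q) ∈ jsmap table i) := by
  have hnn : i < (table.length : Int) := by simpa [PySem.List.len_eq] using hn
  rw [pv_candsB_eq]
  constructor
  · intro hmem
    obtain ⟨p, hp, hin⟩ := List.mem_flatMap.mp hmem
    obtain ⟨jv, hjv, heq⟩ := List.mem_map.mp hin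
    obtain ⟨hjvb, hjvc⟩ := List.mem_filter.mp hjv
    obtain ⟨j', hj0', hjn', p', hp', hK, rfl⟩ := (pv_bucket_mem table _ jv).mp hjvb
    have hpp' : p' = p := congrArg Prod.fst hK
    subst hpp'
    have hj1 : j' = j := congrArg Prod.fst heq
    subst hj1
    have hq : p' = q := congrArg Prod.snd heq
    subst hq
    have hcond := of_decide_eq_true hjvc
    have hij : i < j' := hcond.1
    have hleneq : (rowD table j').length = (rowD table i).length :=
      pv_pre_len table hpre i j' h0 hnn hj0' hjn'
    have hprr := PySem.List.mem_pyRange_one.mp hp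
    have hpnat : p' = ((p'.toNat : Nat) : Int) := (Int.toNat_of_nonneg hprr.1).symm
    have hplen : p'.toNat < (rowD table i).length := by
      have := hprr.2
      rw [PySem.List.len_eq] at this
      omega
    have hmask' : pvMaskKey (rowD table j') ((p'.toNat : Nat) : Int)
        = pvMaskKey (rowD table i) ((p'.toNat : Nat) : Int) := by
      rw [← hpnat]; exact hK
    have hvne : (rowD table j').getD p'.toNat 0 ≠ (rowD table i).getD p'.toNat 0 := by
      have h2 := hcond.2
      rw [hpnat, PySem.List.pyGetD_natCast, PySem.List.pyGetD_natCast] at h2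
      simpa [List.getD] using h2
    have hdiff := (pv_mask_iff (rowD table i) (rowD table j') p'.toNat hplen hleneq.symm).mp
      ⟨hmask', hvne⟩
    have hglue : gluing_of_vectors (rowD table i) (rowD table j') = ((p'.toNat : Nat) : Int) := by
      rw [pv_glue_char _ _ hleneq.ge, hdiff]
    unfold jsmap JsL glueIdx
    apply List.mem_map.mpr
    refine ⟨j', ?_, ?_⟩
    · apply List.mem_filter.mpr
      refine ⟨PySem.List.mem_pyRange_one.mpr ⟨by omega, by simpa [PySem.List.len_eq] using hjn'⟩, ?_⟩
      exact decide_eq_true (by rw [hglue]; exact Int.natCast_nonneg _)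
    · have : gluing_of_vectors (rowD table i) (rowD table j') = p' := by rw [hglue, ← hpnat]
      rw [this]
  · intro hmem
    unfold jsmap JsL glueIdx at hmem
    obtain ⟨j', hj', heq⟩ := List.mem_map.mp hmem
    obtain ⟨hjr, hjg⟩ := List.mem_filter.mp hj'
    have hjrange := PySem.List.mem_pyRange_one.mp hjr
    have hglue0 := of_decide_eq_true hjg
    have hj1 : j' = j := congrArg Prod.fst heq
    subst hj1
    have hq : gluing_of_vectors (rowD table i) (rowD table j') = q := congrArg Prod.snd heq
    have hjn2 : j' < (table.length : Int) := by
      have := hjrange.2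
      rw [PySem.List.len_eq] at this
      exact this
    have hij : i < j' := by omega
    have hleneq : (rowD table j').length = (rowD table i).length :=
      pv_pre_len table hpre i j' h0 hnn (by omega) hjn2
    have hchar := pv_glue_char (rowD table i) (rowD table j') hleneq.ge
    rcases hd : diffPos (rowD table i) (rowD table j') with _ | ⟨pp, _ | ⟨pp2, tt⟩⟩
    · rw [hd] at hchar
      rw [hchar] at hglue0
      exact absurd hglue0 (by norm_num)
    · rw [hd] at hchar
      have hpplen : pp < (rowD table i).length := by
        have hppmem : pp ∈ diffPos (rowD table i) (rowD table j') := by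
          rw [hd]; exact List.mem_cons_self
        unfold diffPos at hppmem
        obtain ⟨hm, -⟩ := List.mem_filter.mp hppmem
        exact List.mem_range.mp hm
      have hmaskpair := (pv_mask_iff (rowD table i) (rowD table j') pp hpplen hleneq.symm).mpr hd
      apply List.mem_flatMap.mpr
      refine ⟨(pp : Int), ?_, ?_⟩
      · exact PySem.List.mem_pyRange_one.mpr
          ⟨Int.natCast_nonneg _, by rw [PySem.List.len_eq]; exact_mod_cast hpplen⟩
      · apply List.mem_map.mpr
        refine ⟨(j', PySem.List.pyGetD (rowD table j') (pp : Int) 0), ?_, ?_⟩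
        · apply List.mem_filter.mpr
          refine ⟨?_, ?_⟩
          · apply (pv_bucket_mem table _ _).mpr
            refine ⟨j', by omega, hjn2, (pp : Int), ?_, hmaskpair.1, rfl⟩
            exact PySem.List.mem_pyRange_one.mpr
              ⟨Int.natCast_nonneg _, by rw [PySem.List.len_eq, hleneq]; exact_mod_cast hpplen⟩
          · apply decide_eq_true
            refine ⟨hij, ?_⟩
            rw [PySem.List.pyGetD_natCast, PySem.List.pyGetD_natCast]
            exact hmaskpair.2
        · have hqq : ((pp : Nat) : Int) = q := by rw [← hq, hchar]
          rw [hqq]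
    · rw [hd] at hchar
      rw [hchar] at hglue0
      exact absurd hglue0 (by norm_num)

theorem pv_bucket_fst_pairwise (table : List (List Int)) (K : Int × List Int) :
    ((bucketsB table).getD K []).Pairwise (fun a b => a.1 < b.1) := by
  rw [pv_bucket_getD]
  apply List.pairwise_map.mpr
  unfold bigList
  rw [pv_filter_flatMap]
  apply pv_pairwise_flatMap
  · intro jr _
    rw [List.pairwise_filter]
    apply List.pairwise_map.mpr
    refine (PySem.List.pairwise_lt_pyRange_one _ _).imp ?_
    intro p q hpq h1 h2
    exfalso
    have e1 : p = K.1 := congrArg Prod.fst (eq_of_beq h1)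
    have e2 : q = K.1 := congrArg Prod.fst (eq_of_beq h2)
    omega
  · rw [PySem.List.enumerate_eq_map_pyRange table []]
    apply List.pairwise_map.mpr
    refine (PySem.List.pairwise_lt_pyRange_one _ _).imp ?_
    intro a b hab x hx y hy
    obtain ⟨p, -, rfl⟩ := List.mem_map.mp (List.mem_of_mem_filter hx)
    obtain ⟨q, -, rfl⟩ := List.mem_map.mp (List.mem_of_mem_filter hy)
    simpa using hab

theorem pv_cands_sorted (table : List (List Int)) (hpre : Pre_start_glued table) (i : Int)
    (h0 : 0 ≤ i) (hn : i < PySem.List.len table) :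
    PySem.List.sorted (candsB table i) (fun t => t.1) = jsmap table i := by
  have hpwj : (jsmap table i).Pairwise (fun a b => a.1 < b.1) := by
    unfold jsmap JsL
    apply List.pairwise_map.mpr
    exact (PySem.List.pairwise_lt_pyRange_one _ _).filter _
  apply PySem.List.sorted_eq_of_perm_of_pairwise_lt _ _ _ ?_ hpwj
  have hndj : (jsmap table i).Nodup :=
    hpwj.imp (fun h heq => absurd (heq ▸ h) (lt_irrefl _))
  have hndc : (candsB table i).Nodup := by
    rw [pv_candsB_eq]
    apply pv_nodup_flatMap
    · intro p hp
      have hb : (((bucketsB table).getD (pvMaskKey (rowD table i) p) []).filter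
          (fun jv => decide (i < jv.1 ∧ jv.2 ≠ PySem.List.pyGetD (rowD table i) p 0))).Pairwise
          (fun a b => a.1 < b.1) := (pv_bucket_fst_pairwise table _).filter _
      refine List.pairwise_map.mpr (hb.imp ?_)
      intro a b h heq
      exact absurd (congrArg Prod.fst heq) (ne_of_lt h)
    · refine (PySem.List.pairwise_lt_pyRange_one _ _).imp ?_
      intro p p' hpp x hx hx'
      obtain ⟨a, _, ha⟩ := List.mem_map.mp hx
      obtain ⟨b, _, hb⟩ := List.mem_map.mp hx'
      have h1 : x.2 = p := by rw [← ha]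
      have h2 : x.2 = p' := by rw [← hb]
      omega
  rw [List.perm_ext_iff_of_nodup hndj hndc]
  intro a
  exact (pv_candsB_mem table hpre i h0 hn a.1 a.2).symm

-- ---- the two step functions (proof-side copies of the port loop bodies) ----
def AstepF (table : List (List Int)) (st : List (List (Option Int)) × List Int) (i : Int) :
    List (List (Option Int)) × List Int :=
  let ti := PySem.List.pyGetD table i []
  let inner :=
    (PySem.List.pyRange (i+1) (PySem.List.len table) 1).foldl
      (fun (st2 : List (List (Option Int)) × List Int × Bool) j =>
        let false_index := gluing_of_vectors ti (PySem.List.pyGetD table j [])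
        if 0 ≤ false_index then
          (st2.1 ++ [PySem.List.pySetD (List.map some ti) false_index none],
           st2.2.1 ++ [j], true)
        else st2)
      (st.1, st.2, false)
  if inner.2.2 = false ∧ i ∉ inner.2.1 then (inner.1 ++ [List.map some ti], inner.2.1)
  else (inner.1, inner.2.1)

def BstepF (table : List (List Int)) (st : PySem.Set Int × List (List (Option Int)))
    (ir : Int × List Int) : PySem.Set Int × List (List (Option Int)) :=
  let i := ir.1
  let row := ir.2
  let pairs :=
    (PySem.List.pyRange 0 (PySem.List.len row) 1).foldl
      (fun acc p =>
        ((bucketsB table).getD (pvMaskKey row p) []).foldl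
          (fun acc jv =>
            if i < jv.1 ∧ jv.2 ≠ PySem.List.pyGetD row p 0 then acc ++ [(jv.1, p)] else acc)
          acc)
      []
  let spairs := PySem.List.sorted pairs (fun t => t.1)
  let st2 := spairs.foldl
    (fun (st2 : PySem.Set Int × List (List (Option Int))) jp =>
      (PySem.Set.add st2.1 jp.1, st2.2 ++ [PySem.List.pySetD (List.map some row) jp.2 none]))
    st
  if spairs = [] ∧ i ∉ st2.1 then (st2.1, st2.2 ++ [List.map some row]) else st2

theorem pv_start_glued_eq (table : List (List Int)) :
    start_glued table
      = ((PySem.List.pyRange 0 (PySem.List.len table) 1).foldl (AstepF table) ([], [])).1 := rfl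

theorem pv_alt_eq (table : List (List Int)) :
    start_glued_alt table
      = ((PySem.List.enumerate table).foldl (BstepF table) (PySem.Set.empty, [])).2 := rfl

theorem pv_notin_JsL (table : List (List Int)) (i : Int) : i ∉ JsL table i := by
  intro hmem
  unfold JsL at hmem
  have h1 := (List.mem_filter.mp hmem).1
  rw [PySem.List.mem_pyRange_one] at h1
  omega

theorem pv_Astep_eq (table : List (List Int)) (i : Int)
    (out : List (List (Option Int))) (ix : List Int) :
    AstepF table (out, ix) i
      = (out ++ (JsL table i).map (emitV table i)
             ++ (if JsL table i = [] ∧ i ∉ ix then [List.map some (rowD table i)] else []),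
         ix ++ JsL table i) := by
  simp only [AstepF]
  rw [pv_inner_fold
    (p := fun j => 0 ≤ gluing_of_vectors (PySem.List.pyGetD table i []) (PySem.List.pyGetD table j []))
    (f := fun j => PySem.List.pySetD (List.map some (PySem.List.pyGetD table i []))
      (gluing_of_vectors (PySem.List.pyGetD table i []) (PySem.List.pyGetD table j [])) none)]
  dsimp only
  rw [Bool.false_or]
  have hfilt : (PySem.List.pyRange (i+1) (PySem.List.len table) 1).filter
      (fun x => decide (0 ≤ gluing_of_vectors (PySem.List.pyGetD table i []) (PySem.List.pyGetD table x [])))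
      = JsL table i := rfl
  rw [hfilt]
  have hany : ((PySem.List.pyRange (i+1) (PySem.List.len table) 1).any
      (fun x => decide (0 ≤ gluing_of_vectors (PySem.List.pyGetD table i []) (PySem.List.pyGetD table x []))) = false)
      ↔ JsL table i = [] := by
    rw [List.any_eq_false, ← hfilt, List.filter_eq_nil_iff]
  have hcond : ((PySem.List.pyRange (i+1) (PySem.List.len table) 1).any
        (fun x => decide (0 ≤ gluing_of_vectors (PySem.List.pyGetD table i []) (PySem.List.pyGetD table x []))) = false
        ∧ i ∉ ix ++ JsL table i)
      ↔ (JsL table i = [] ∧ i ∉ ix) := by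
    rw [hany, List.mem_append]
    constructor
    · rintro ⟨h1, h2⟩
      exact ⟨h1, fun h => h2 (Or.inl h)⟩
    · rintro ⟨h1, h2⟩
      refine ⟨h1, ?_⟩
      rintro (h | h)
      · exact h2 h
      · exact pv_notin_JsL table i h
  by_cases hc : JsL table i = [] ∧ i ∉ ix
  · rw [if_pos (hcond.mpr hc), if_pos hc]
    rfl
  · rw [if_neg (fun h => hc (hcond.mp h)), if_neg hc, List.append_nil]
    rfl

theorem pv_Bstep_eq (table : List (List Int)) (hpre : Pre_start_glued table) (i : Int)
    (h0 : 0 ≤ i) (hn : i < PySem.List.len table)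
    (gl : PySem.Set Int) (out : List (List (Option Int))) :
    BstepF table (gl, out) (i, rowD table i)
      = (PySem.Set.update gl (JsL table i),
         out ++ (JsL table i).map (emitV table i)
             ++ (if JsL table i = [] ∧ i ∉ PySem.Set.update gl (JsL table i)
                  then [List.map some (rowD table i)] else [])) := by
  simp only [BstepF]
  have hs : PySem.List.sorted
      ((PySem.List.pyRange 0 (PySem.List.len (rowD table i)) 1).foldl
        (fun acc p =>
          ((bucketsB table).getD (pvMaskKey (rowD table i) p) []).foldl
            (fun acc jv =>
              if i < jv.1 ∧ jv.2 ≠ PySem.List.pyGetD (rowD table i) p 0 then acc ++ [(jv.1, p)]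
              else acc)
            acc)
        []) (fun t => t.1) = jsmap table i := pv_cands_sorted table hpre i h0 hn
  rw [hs]
  rw [PySem.List.foldl_prod_mk
    (f := fun s (jp : Int × Int) => PySem.Set.add s jp.1)
    (g := fun o (jp : Int × Int) => o ++ [PySem.List.pySetD (List.map some (rowD table i)) jp.2 none])]
  dsimp only
  rw [PySem.List.foldl_append_singleton_eq_map,
    ← PySem.Set.update_map_eq_foldl_add (f := fun jp : Int × Int => jp.1)]
  have hm1 : (jsmap table i).map (fun jp : Int × Int => jp.1) = JsL table i := by
    unfold jsmap
    rw [List.map_map]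
    simp [Function.comp_def]
  have hm2 : (jsmap table i).map
      (fun jp : Int × Int => PySem.List.pySetD (List.map some (rowD table i)) jp.2 none)
      = (JsL table i).map (emitV table i) := by
    unfold jsmap
    rw [List.map_map]
    rfl
  rw [hm1, hm2]
  have hm0 : (jsmap table i = []) ↔ JsL table i = [] := by
    unfold jsmap
    simp
  by_cases hc : JsL table i = [] ∧ i ∉ PySem.Set.update gl (JsL table i)
  · rw [if_pos ⟨hm0.mpr hc.1, hc.2⟩, if_pos hc]
  · rw [if_neg (fun h => hc ⟨hm0.mp h.1, h.2⟩), if_neg hc, List.append_nil]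

theorem pv_outer_ind (table : List (List Int)) (hpre : Pre_start_glued table) :
    ∀ (L : List Int), (∀ i ∈ L, 0 ≤ i ∧ i < PySem.List.len table) →
    ∀ (out : List (List (Option Int))) (ix : List Int) (gl : PySem.Set Int),
      (∀ x : Int, x ∈ ix ↔ x ∈ gl) →
      (L.foldl (AstepF table) (out, ix)).1
        = (L.foldl (fun st i => BstepF table st (i, rowD table i)) (gl, out)).2 := by
  intro L
  induction L with
  | nil => intro _ out ix gl _; rfl
  | cons a t ih =>
    intro hL out ix gl hinv
    obtain ⟨ha0, han⟩ := hL a List.mem_cons_self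
    simp only [List.foldl_cons]
    rw [pv_Astep_eq, pv_Bstep_eq table hpre a ha0 han]
    have hiffJ : ∀ x : Int, x ∈ ix ++ JsL table a ↔ x ∈ PySem.Set.update gl (JsL table a) := by
      intro x
      rw [List.mem_append, PySem.Set.mem_update, hinv x]
    have hcond : (JsL table a = [] ∧ a ∉ ix)
        ↔ (JsL table a = [] ∧ a ∉ PySem.Set.update gl (JsL table a)) := by
      constructor
      · rintro ⟨h1, h2⟩
        refine ⟨h1, ?_⟩
        rw [PySem.Set.mem_update, h1]
        simp only [List.not_mem_nil, or_false]
        exact fun h => h2 ((hinv a).mpr h)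
      · rintro ⟨h1, h2⟩
        refine ⟨h1, fun hmem => h2 ?_⟩
        rw [PySem.Set.mem_update]
        exact Or.inl ((hinv a).mp hmem)
    by_cases hc : JsL table a = [] ∧ a ∉ ix
    · rw [if_pos hc, if_pos (hcond.mp hc)]
      exact ih (fun i hi => hL i (List.mem_cons_of_mem _ hi)) _ _ _ hiffJ
    · rw [if_neg hc, if_neg (fun h => hc (hcond.mpr h))]
      exact ih (fun i hi => hL i (List.mem_cons_of_mem _ hi)) _ _ _ hiffJ

theorem pv_outer (table : List (List Int)) (hpre : Pre_start_glued table) :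
    start_glued table = start_glued_alt table := by
  rw [pv_start_glued_eq, pv_alt_eq, PySem.List.enumerate_eq_map_pyRange table [],
    List.foldl_map]
  exact pv_outer_ind table hpre (PySem.List.pyRange 0 (PySem.List.len table) 1)
    (fun i hi => by
      have h := PySem.List.mem_pyRange_one.mp hi
      exact ⟨h.1, h.2⟩)
    [] [] PySem.Set.empty (by simp [PySem.Set.empty])

-- ===== VERDICT (by name: the statement is the Claim_ definition above) =====
theorem start_glued_spec : Claim_equal_start_glued := by
  intro table _ hpre
  unfold Spec_start_glued
  exact pv_outer table hpre
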